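-- pv_equiv track=rewrite | github.com/molly5617/NTU-CV | HW9/HW9.py | kirsch
-- ===== SOURCE A (Python) =====
-- def expan(arr):
--     m=len(arr)
--     n=len(arr[0])
--     res=res=[[0]*(n+2) for i in range(m+2)]
--     for i in range(1,m+1):
--         res[i][0]=arr[i-1][0]
--         res[i][n+1]=arr[i-1][n-1]
--     for j in range(1,n+1):
--         res[0][j]=arr[0][j-1]
--         res[m+1][j]=arr[m-1][j-1]
--     res[0][0]=arr[0][0]
--     res[0][n+1]=arr[0][n-1]
--     res[m+1][0]=arr[m-1][0]
--     res[m+1][n+1]=arr[m-1][n-1]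
--     for i in range(1,m+1):
--         for j in range(1,n+1):
--             res[i][j]=arr[i-1][j-1]
--     return res
--
-- def kirsch(lena,theshold):
--     m=len(lena)
--     n=len(lena[0])
--     lena=expan(lena)
--     res=[[0]*(n) for i in range(m)]
--     for i in range(m):
--         for j in range(n):
--             p1=5*(lena[i][j+2]+lena[i+1][j+2]+lena[i+2][j+2])
--             p1+=3*(-lena[i][j]-lena[i][j+1]-lena[i+1][j]-lena[i+2][j]-lena[i+2][j+1])
--
--             p2=5*(lena[i][j]+lena[i+1][j]+lena[i+2][j])
--             p2+=3*(-lena[i][j+2]-lena[i][j+1]-lena[i+1][j+2]-lena[i+2][j+2]-lena[i+2][j+1])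
--
--             p3=5*(lena[i][j]+lena[i][j+1]+lena[i][j+2])
--             p3+=3*(-lena[i+1][j]-lena[i+2][j]-lena[i+1][j+2]-lena[i+2][j+2]-lena[i+2][j+1])
--
--             p4=5*(lena[i+2][j]+lena[i+2][j+1]+lena[i+2][j+2])
--             p4+=3*(-lena[i][j]-lena[i+1][j]-lena[i][j+2]-lena[i+1][j+2]-lena[i][j+1])
--
--             p5=5*(lena[i][j]+lena[i+1][j]+lena[i][j+1])
--             p5+=3*(-lena[i][j+2]-lena[i+1][j+2]-lena[i+2][j+2]-lena[i+2][j+1]-lena[i+2][j])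
--
--             p6=5*(lena[i][j+2]+lena[i+1][j+2]+lena[i][j+1])
--             p6+=3*(-lena[i][j]-lena[i+1][j]-lena[i+2][j]-lena[i+2][j+1]-lena[i+2][j+2])
--
--             p7=5*(lena[i+2][j+2]+lena[i+1][j+2]+lena[i+2][j+1])
--             p7+=3*(-lena[i][j]-lena[i][j+1]-lena[i+1][j]-lena[i+2][j]-lena[i][j+2])
--
--             p8=5*(lena[i+2][j]+lena[i+1][j]+lena[i+2][j+1])
--             p8+=3*(-lena[i][j]-lena[i][j+1]-lena[i][j+2]-lena[i+1][j+2]-lena[i+2][j+2])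
--
--
--
--             grad=max(p1,p2,p3,p4,p5,p6,p7,p8)
--             if grad<theshold:
--                 res[i][j]=255
--     return res
-- ===== SOURCE B (Python) =====
-- def kirsch(lena, theshold):
--     # Whole-image staged passes: 8 replication-shifted copies of the image, an
--     # elementwise total, a sliding circular 3-window maximum W, then one
--     # thresholding pass on 8*W - 3*total (== max_s(5*window_s - 3*rest)).
--     n = len(lena[0])
--     img = [r[:n] for r in lena]
--
--     def shift_rows(a, d):
--         if d < 0:
--             return [a[0]] + a[:-1]
--         if d > 0:
--             return a[1:] + [a[-1]]
--         return a
--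
--     def shift_cols(a, d):
--         if d < 0:
--             return [[r[0]] + r[:-1] for r in a]
--         if d > 0:
--             return [r[1:] + [r[-1]] for r in a]
--         return a
--
--     def zip_with(f, A, B):
--         return [[f(x, y) for x, y in zip(ra, rb)] for ra, rb in zip(A, B)]
--
--     # neighbour images, clockwise from top-left
--     dirs = [(-1, -1), (-1, 0), (-1, 1), (0, 1), (1, 1), (1, 0), (1, -1), (0, -1)]
--     N = [shift_cols(shift_rows(img, di), dj) for di, dj in dirs]
--
--     total = N[0]
--     for k in range(1, 8):
--         total = zip_with(lambda x, y: x + y, total, N[k])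
--
--     w = zip_with(lambda x, y: x + y, zip_with(lambda x, y: x + y, N[0], N[1]), N[2])
--     best = w
--     for s in range(1, 8):
--         w = zip_with(lambda x, y: x + y,
--                      zip_with(lambda x, y: x - y, w, N[s - 1]), N[(s + 2) % 8])
--         best = zip_with(max, best, w)
--
--     return [[255 if 8 * wv - 3 * tv < theshold else 0 for wv, tv in zip(rw, rt)]
--             for rw, rt in zip(best, total)]
-- ===== Notes on version B (the rewrite author's own statement) =====
-- stated objective: alternative
-- what changed: Replaces the padded copy and per-pixel evaluation of eight unrolled 5w-3(rest) masks by whole-image staged passes: eight replication-shifted copies of the image, an elementwise total image, a sliding circular 3-window maximum image W updated incrementally (w += next - dropped), and one final thresholding pass on 8*W - 3*total.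
import Mathlib
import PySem

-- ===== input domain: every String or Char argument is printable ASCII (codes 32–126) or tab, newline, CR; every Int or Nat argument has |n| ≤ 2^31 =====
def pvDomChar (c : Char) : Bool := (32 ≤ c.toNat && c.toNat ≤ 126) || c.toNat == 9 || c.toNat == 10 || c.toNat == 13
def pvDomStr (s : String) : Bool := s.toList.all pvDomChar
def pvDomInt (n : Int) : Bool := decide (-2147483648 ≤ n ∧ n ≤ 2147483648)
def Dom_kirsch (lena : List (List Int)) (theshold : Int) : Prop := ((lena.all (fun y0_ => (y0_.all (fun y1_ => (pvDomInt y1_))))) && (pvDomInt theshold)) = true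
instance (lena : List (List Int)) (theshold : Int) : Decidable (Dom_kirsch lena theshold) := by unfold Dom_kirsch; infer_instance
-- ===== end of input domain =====

-- B replaces A's padded copy + eight per-pixel unrolled 5w-3(rest) masks by whole-image staged
-- passes: eight replication-shifted copies of the image, an elementwise total image, a sliding
-- circular 3-window maximum image built incrementally, and one thresholding pass on 8*W-3*total
-- (objective: alternative).

-- ===== PORT A =====
-- arr[i][j] read with nonnegative indices (exact inside Pre_, where every index is in range)
def pvGetAt (r : List (List Int)) (k l : Nat) : Int := (r.getD k []).getD l 0
-- res[i][j] = v with nonnegative in-range indices (exact there)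
def pvSetAt (r : List (List Int)) (i j : Nat) (v : Int) : List (List Int) :=
  r.modify i (fun row => row.set j v)

def expan (arr : List (List Int)) : List (List Int) :=
  let m := arr.length
  let n := (arr.getD 0 []).length
  let res0 := List.replicate (m+2) (List.replicate (n+2) (0:Int))
  let res1 := (List.range' 1 m).foldl (fun r i =>
      pvSetAt (pvSetAt r i 0 (pvGetAt arr (i-1) 0)) i (n+1) (pvGetAt arr (i-1) (n-1))) res0
  let res2 := (List.range' 1 n).foldl (fun r j =>
      pvSetAt (pvSetAt r 0 j (pvGetAt arr 0 (j-1))) (m+1) j (pvGetAt arr (m-1) (j-1))) res1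
  let res3 := pvSetAt res2 0 0 (pvGetAt arr 0 0)
  let res4 := pvSetAt res3 0 (n+1) (pvGetAt arr 0 (n-1))
  let res5 := pvSetAt res4 (m+1) 0 (pvGetAt arr (m-1) 0)
  let res6 := pvSetAt res5 (m+1) (n+1) (pvGetAt arr (m-1) (n-1))
  (List.range' 1 m).foldl (fun r i =>
      (List.range' 1 n).foldl (fun r j => pvSetAt r i j (pvGetAt arr (i-1) (j-1))) r) res6

def kirsch (lena : List (List Int)) (theshold : Int) : List (List Int) :=
  let m := lena.length
  let n := (lena.getD 0 []).length
  let L := expan lena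
  (List.range m).map fun i => (List.range n).map fun j =>
    let p1 := 5*(pvGetAt L i (j+2) + pvGetAt L (i+1) (j+2) + pvGetAt L (i+2) (j+2))
              + 3*(-(pvGetAt L i j) - pvGetAt L i (j+1) - pvGetAt L (i+1) j - pvGetAt L (i+2) j - pvGetAt L (i+2) (j+1))
    let p2 := 5*(pvGetAt L i j + pvGetAt L (i+1) j + pvGetAt L (i+2) j)
              + 3*(-(pvGetAt L i (j+2)) - pvGetAt L i (j+1) - pvGetAt L (i+1) (j+2) - pvGetAt L (i+2) (j+2) - pvGetAt L (i+2) (j+1))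
    let p3 := 5*(pvGetAt L i j + pvGetAt L i (j+1) + pvGetAt L i (j+2))
              + 3*(-(pvGetAt L (i+1) j) - pvGetAt L (i+2) j - pvGetAt L (i+1) (j+2) - pvGetAt L (i+2) (j+2) - pvGetAt L (i+2) (j+1))
    let p4 := 5*(pvGetAt L (i+2) j + pvGetAt L (i+2) (j+1) + pvGetAt L (i+2) (j+2))
              + 3*(-(pvGetAt L i j) - pvGetAt L (i+1) j - pvGetAt L i (j+2) - pvGetAt L (i+1) (j+2) - pvGetAt L i (j+1))
    let p5 := 5*(pvGetAt L i j + pvGetAt L (i+1) j + pvGetAt L i (j+1))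
              + 3*(-(pvGetAt L i (j+2)) - pvGetAt L (i+1) (j+2) - pvGetAt L (i+2) (j+2) - pvGetAt L (i+2) (j+1) - pvGetAt L (i+2) j)
    let p6 := 5*(pvGetAt L i (j+2) + pvGetAt L (i+1) (j+2) + pvGetAt L i (j+1))
              + 3*(-(pvGetAt L i j) - pvGetAt L (i+1) j - pvGetAt L (i+2) j - pvGetAt L (i+2) (j+1) - pvGetAt L (i+2) (j+2))
    let p7 := 5*(pvGetAt L (i+2) (j+2) + pvGetAt L (i+1) (j+2) + pvGetAt L (i+2) (j+1))
              + 3*(-(pvGetAt L i j) - pvGetAt L i (j+1) - pvGetAt L (i+1) j - pvGetAt L (i+2) j - pvGetAt L i (j+2))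
    let p8 := 5*(pvGetAt L (i+2) j + pvGetAt L (i+1) j + pvGetAt L (i+2) (j+1))
              + 3*(-(pvGetAt L i j) - pvGetAt L i (j+1) - pvGetAt L i (j+2) - pvGetAt L (i+1) (j+2) - pvGetAt L (i+2) (j+2))
    let grad := max (max (max (max (max (max (max p1 p2) p3) p4) p5) p6) p7) p8
    if grad < theshold then 255 else 0

-- ===== PORT B =====
-- zip_with(f, A, B): Python's zip truncates to the shorter list, exactly List.zipWith
def zipWith2 (f : Int → Int → Int) (A B : List (List Int)) : List (List Int) :=
  List.zipWith (fun ra rb => List.zipWith f ra rb) A B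

-- shift_rows: a[:-1] = dropLast, a[1:] = drop 1 (exact); a[0] / a[-1] read with getD
-- (exact for nonempty a, which Pre_ guarantees)
def shiftRows (a : List (List Int)) (d : Int) : List (List Int) :=
  if d < 0 then a.getD 0 [] :: a.dropLast
  else if 0 < d then a.drop 1 ++ [a.getD (a.length - 1) []]
  else a

def shiftCols (a : List (List Int)) (d : Int) : List (List Int) :=
  if d < 0 then a.map (fun r => r.getD 0 0 :: r.dropLast)
  else if 0 < d then a.map (fun r => r.drop 1 ++ [r.getD (r.length - 1) 0])
  else a

def kirschDirs : List (Int × Int) :=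
  [(-1,-1), (-1,0), (-1,1), (0,1), (1,1), (1,0), (1,-1), (0,-1)]

def kirsch_alt (lena : List (List Int)) (theshold : Int) : List (List Int) :=
  let n := (lena.getD 0 []).length
  let img := lena.map (fun r => r.take n)
  let N := kirschDirs.map (fun p => shiftCols (shiftRows img p.1) p.2)
  let total := (List.range' 1 7).foldl (fun t k => zipWith2 (fun x y => x + y) t (N.getD k [])) (N.getD 0 [])
  let w0 := zipWith2 (fun x y => x + y) (zipWith2 (fun x y => x + y) (N.getD 0 []) (N.getD 1 [])) (N.getD 2 [])
  let wb := (List.range' 1 7).foldl (fun (st : List (List Int) × List (List Int)) s =>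
      let w := zipWith2 (fun x y => x + y) (zipWith2 (fun x y => x - y) st.1 (N.getD (s-1) [])) (N.getD ((s+2)%8) [])
      (w, zipWith2 max st.2 w)) (w0, w0)
  zipWith2 (fun wv tv => if 8*wv - 3*tv < theshold then 255 else 0) wb.2 total

-- ===== PRECONDITION & SPEC =====
-- Pre_ excludes exactly the inputs where the Python A raises IndexError: an empty image, an empty
-- first row, or a later row shorter than the first (A indexes every row at column n-1).
def Pre_kirsch (lena : List (List Int)) (theshold : Int) : Prop :=
  lena ≠ [] ∧ 0 < (lena.getD 0 []).length ∧ ∀ row ∈ lena, (lena.getD 0 []).length ≤ row.length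
instance (lena : List (List Int)) (theshold : Int) : Decidable (Pre_kirsch lena theshold) := by
  unfold Pre_kirsch; infer_instance
def pvWitness_kirsch : List (List Int) × Int := ([[1, 2], [3, 4]], 10)

def Spec_kirsch (lena : List (List Int)) (theshold : Int) (out : List (List Int)) : Prop := out = kirsch_alt lena theshold
instance (lena : List (List Int)) (theshold : Int) (out : List (List Int)) : Decidable (Spec_kirsch lena theshold out) := by unfold Spec_kirsch; infer_instance

-- ===== CLAIM (what is proved, stated in full; the proofs are below) =====
def Claim_equal_kirsch : Prop := ∀ (lena : List (List Int)) (theshold : Int), Dom_kirsch lena theshold → Pre_kirsch lena theshold → Spec_kirsch lena theshold (kirsch lena theshold)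

-- ===== LEMMAS AND PROOFS =====

-- ---------- A-side: characterisation of expan ----------

-- r is an R×C rectangle
def pvRect (r : List (List Int)) (R C : Nat) : Prop :=
  r.length = R ∧ ∀ k, k < R → (r.getD k []).length = C

theorem pvRect_setAt {r : List (List Int)} {R C : Nat} (i j : Nat) (h : pvRect r R C) (v : Int) :
    pvRect (pvSetAt r i j v) R C := by
  obtain ⟨h1, h2⟩ := h
  refine ⟨by simpa [pvSetAt] using h1, ?_⟩
  intro k hk
  have hk2 := h2 k hk
  rw [List.getD_eq_getElem?_getD] at hk2 ⊢
  rw [pvSetAt, List.getElem?_modify]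
  cases hx : r[k]? with
  | none => simp [hx] at hk2 ⊢; exact hk2
  | some row =>
    simp only [hx, Option.map_eq_map, Option.map_some, Option.getD_some] at hk2 ⊢
    split <;> simp [List.length_set, hk2]

theorem pvGetAt_setAt {r : List (List Int)} {R C : Nat} (h : pvRect r R C)
    {i j : Nat} (hi : i < R) (hj : j < C) (v : Int) (k l : Nat) :
    pvGetAt (pvSetAt r i j v) k l = if k = i ∧ l = j then v else pvGetAt r k l := by
  obtain ⟨h1, h2⟩ := h
  rw [pvGetAt, pvGetAt, List.getD_eq_getElem?_getD, List.getD_eq_getElem?_getD,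
    pvSetAt, List.getElem?_modify]
  cases hx : r[k]? with
  | none =>
    have hkR : ¬ k < R := by
      intro hkR; rw [List.getElem?_eq_none_iff] at hx; omega
    have : ¬ (k = i) := by intro he; exact hkR (he ▸ hi)
    simp [this, hx]
  | some row =>
    have hkR : k < R := by rw [← h1]; exact (List.getElem?_eq_some_iff.mp hx).1
    have hrow : row.length = C := by
      have := h2 k hkR
      rw [List.getD_eq_getElem?_getD, hx] at this
      simpa using this
    have hrg : r.getD k [] = row := by rw [List.getD_eq_getElem?_getD, hx]; rfl
    by_cases hki : i = k
    · subst hki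
      by_cases hlj : l = j
      · subst hlj
        simp [hrow, hj]
      · simp only [Option.map_eq_map, Option.map_some, Option.getD_some, if_true, true_and,
          List.getElem?_set, hrg]
        split_ifs <;> first | rfl | omega
    · simp only [Option.map_eq_map, Option.map_some, Option.getD_some, if_neg hki, hrg,
        if_neg (show ¬ (k = i ∧ l = j) from fun hc => hki hc.1.symm)]
      rw [List.getD_eq_getElem?_getD]

-- pvGetAt of an all-zero rectangle
theorem pvRect_replicate (R C : Nat) :
    pvRect (List.replicate R (List.replicate C (0:Int))) R C := by
  refine ⟨by simp, ?_⟩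
  intro k hk
  rw [List.getD_replicate _ hk]; simp

-- stage 1 shape: for each row i in range, set columns c1 and c2
theorem rd_fold_cols {R C : Nat} (A1 A2 : Nat → Int) (c1 c2 : Nat)
    (hc1 : c1 < C) (hc2 : c2 < C) (hne : c1 ≠ c2) :
    ∀ (t s : Nat) (r : List (List Int)), pvRect r R C → s + t ≤ R →
      pvRect ((List.range' s t).foldl
        (fun r i => pvSetAt (pvSetAt r i c1 (A1 i)) i c2 (A2 i)) r) R C ∧
      ∀ k l, pvGetAt ((List.range' s t).foldl
          (fun r i => pvSetAt (pvSetAt r i c1 (A1 i)) i c2 (A2 i)) r) k l =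
        if s ≤ k ∧ k < s + t ∧ l = c1 then A1 k
        else if s ≤ k ∧ k < s + t ∧ l = c2 then A2 k
        else pvGetAt r k l := by
  intro t
  induction t with
  | zero =>
    intro s r hr _
    refine ⟨by simpa using hr, ?_⟩
    intro k l
    simp only [List.range'_zero, List.foldl_nil]
    split_ifs <;> first | rfl | omega
  | succ t ih =>
    intro s r hr hst
    have hs : s < R := by omega
    have hr' : pvRect (pvSetAt (pvSetAt r s c1 (A1 s)) s c2 (A2 s)) R C :=
      pvRect_setAt _ _ (pvRect_setAt _ _ hr _) _
    have IH := ih (s+1) _ hr' (by omega)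
    rw [List.range'_succ, List.foldl_cons]
    refine ⟨IH.1, ?_⟩
    intro k l
    rw [IH.2 k l, pvGetAt_setAt (pvRect_setAt _ _ hr _) hs hc2,
      pvGetAt_setAt hr hs hc1]
    by_cases hk : k = s
    · subst hk; split_ifs <;> first | rfl | omega
    · split_ifs <;> first | rfl | omega

-- stage 2 shape: for each column j in range, set rows r1 and r2
theorem rd_fold_rows {R C : Nat} (B1 B2 : Nat → Int) (r1 r2 : Nat)
    (hr1 : r1 < R) (hr2 : r2 < R) (hne : r1 ≠ r2) :
    ∀ (t s : Nat) (r : List (List Int)), pvRect r R C → s + t ≤ C →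
      pvRect ((List.range' s t).foldl
        (fun r j => pvSetAt (pvSetAt r r1 j (B1 j)) r2 j (B2 j)) r) R C ∧
      ∀ k l, pvGetAt ((List.range' s t).foldl
          (fun r j => pvSetAt (pvSetAt r r1 j (B1 j)) r2 j (B2 j)) r) k l =
        if k = r1 ∧ s ≤ l ∧ l < s + t then B1 l
        else if k = r2 ∧ s ≤ l ∧ l < s + t then B2 l
        else pvGetAt r k l := by
  intro t
  induction t with
  | zero =>
    intro s r hr _
    refine ⟨by simpa using hr, ?_⟩
    intro k l
    simp only [List.range'_zero, List.foldl_nil]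
    split_ifs <;> first | rfl | omega
  | succ t ih =>
    intro s r hr hst
    have hs : s < C := by omega
    have hr' : pvRect (pvSetAt (pvSetAt r r1 s (B1 s)) r2 s (B2 s)) R C :=
      pvRect_setAt _ _ (pvRect_setAt _ _ hr _) _
    have IH := ih (s+1) _ hr' (by omega)
    rw [List.range'_succ, List.foldl_cons]
    refine ⟨IH.1, ?_⟩
    intro k l
    rw [IH.2 k l, pvGetAt_setAt (pvRect_setAt _ _ hr _) hr2 hs,
      pvGetAt_setAt hr hr1 hs]
    by_cases hl : l = s
    · subst hl; split_ifs <;> first | rfl | omega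
    · split_ifs <;> first | rfl | omega

-- interior inner loop: fill row i, columns s..s+t-1
theorem rd_fold_rowfill {R C : Nat} (F : Nat → Int) (i : Nat) (hi : i < R) :
    ∀ (t s : Nat) (r : List (List Int)), pvRect r R C → s + t ≤ C →
      pvRect ((List.range' s t).foldl (fun r j => pvSetAt r i j (F j)) r) R C ∧
      ∀ k l, pvGetAt ((List.range' s t).foldl (fun r j => pvSetAt r i j (F j)) r) k l =
        if k = i ∧ s ≤ l ∧ l < s + t then F l
        else pvGetAt r k l := by
  intro t
  induction t with
  | zero =>
    intro s r hr _
    refine ⟨by simpa using hr, ?_⟩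
    intro k l
    simp only [List.range'_zero, List.foldl_nil]
    split_ifs <;> first | rfl | omega
  | succ t ih =>
    intro s r hr hst
    have hs : s < C := by omega
    have hr' : pvRect (pvSetAt r i s (F s)) R C := pvRect_setAt _ _ hr _
    have IH := ih (s+1) _ hr' (by omega)
    rw [List.range'_succ, List.foldl_cons]
    refine ⟨IH.1, ?_⟩
    intro k l
    rw [IH.2 k l, pvGetAt_setAt hr hi hs]
    by_cases hl : l = s
    · subst hl; split_ifs <;> first | rfl | omega
    · split_ifs <;> first | rfl | omega

-- interior double loop: rows s..s+t-1, columns 1..nI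
theorem rd_fold_interior {R C : Nat} (G : Nat → Nat → Int) (nI : Nat) (hnI : 1 + nI ≤ C) :
    ∀ (t s : Nat) (r : List (List Int)), pvRect r R C → s + t ≤ R →
      pvRect ((List.range' s t).foldl
        (fun r i => (List.range' 1 nI).foldl (fun r j => pvSetAt r i j (G i j)) r) r) R C ∧
      ∀ k l, pvGetAt ((List.range' s t).foldl
          (fun r i => (List.range' 1 nI).foldl (fun r j => pvSetAt r i j (G i j)) r) r) k l =
        if s ≤ k ∧ k < s + t ∧ 1 ≤ l ∧ l < 1 + nI then G k l
        else pvGetAt r k l := by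
  intro t
  induction t with
  | zero =>
    intro s r hr _
    refine ⟨by simpa using hr, ?_⟩
    intro k l
    simp only [List.range'_zero, List.foldl_nil]
    split_ifs <;> first | rfl | omega
  | succ t ih =>
    intro s r hr hst
    have hs : s < R := by omega
    have INNER := rd_fold_rowfill (R := R) (C := C) (G s) s hs nI 1 r hr hnI
    have IH := ih (s+1) _ INNER.1 (by omega)
    rw [List.range'_succ, List.foldl_cons]
    refine ⟨IH.1, ?_⟩
    intro k l
    rw [IH.2 k l, INNER.2 k l]
    by_cases hk : k = s
    · subst hk; split_ifs <;> first | rfl | omega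
    · split_ifs <;> first | rfl | omega

-- the expanded (replication-padded) image read anywhere in range is the clamped read of arr
theorem rd_expan (arr : List (List Int))
    (hm : 0 < arr.length) (hn : 0 < (arr.getD 0 []).length)
    (k l : Nat) (hk : k < arr.length + 2) (hl : l < (arr.getD 0 []).length + 2) :
    pvGetAt (expan arr) k l =
      (arr.getD (min (k-1) (arr.length-1)) []).getD (min (l-1) ((arr.getD 0 []).length-1)) 0 := by
  have key : ∀ (x y x' y' : Nat), x = x' → y = y' →
      (arr.getD x []).getD y 0 = (arr.getD x' []).getD y' 0 := by
    intro x y x' y' hx hy; rw [hx, hy]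
  set m := arr.length with hmdef
  set n := (arr.getD 0 []).length with hndef
  rw [expan]
  have h0 : pvRect (List.replicate (m+2) (List.replicate (n+2) (0:Int))) (m+2) (n+2) :=
    pvRect_replicate _ _
  have S1 := rd_fold_cols (R := m+2) (C := n+2)
    (fun i => pvGetAt arr (i-1) 0) (fun i => pvGetAt arr (i-1) (n-1)) 0 (n+1)
    (by omega) (by omega) (by omega) m 1 _ h0 (by omega)
  have S2 := rd_fold_rows (R := m+2) (C := n+2)
    (fun j => pvGetAt arr 0 (j-1)) (fun j => pvGetAt arr (m-1) (j-1)) 0 (m+1)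
    (by omega) (by omega) (by omega) n 1 _ S1.1 (by omega)
  have R3 := pvRect_setAt (r := _) (R := m+2) (C := n+2) 0 0 S2.1 (pvGetAt arr 0 0)
  have R4 := pvRect_setAt (r := _) (R := m+2) (C := n+2) 0 (n+1) R3 (pvGetAt arr 0 (n-1))
  have R5 := pvRect_setAt (r := _) (R := m+2) (C := n+2) (m+1) 0 R4 (pvGetAt arr (m-1) 0)
  have R6 := pvRect_setAt (r := _) (R := m+2) (C := n+2) (m+1) (n+1) R5 (pvGetAt arr (m-1) (n-1))
  have S7 := rd_fold_interior (R := m+2) (C := n+2)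
    (fun i j => pvGetAt arr (i-1) (j-1)) n (by omega) m 1 _ R6 (by omega)
  rw [S7.2 k l,
    pvGetAt_setAt R5 (by omega) (by omega) _ k l,
    pvGetAt_setAt R4 (by omega) (by omega) _ k l,
    pvGetAt_setAt R3 (by omega) (by omega) _ k l,
    pvGetAt_setAt S2.1 (by omega) (by omega) _ k l,
    S2.2 k l, S1.2 k l]
  simp only [pvGetAt]
  split_ifs <;> first
    | (exact key _ _ _ _ (by omega) (by omega))
    | omega

-- ---------- B-side: matrix characterisation ----------

-- A is an m×n matrix whose (i,j) entry is f i j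
def IsMat (A : List (List Int)) (m n : Nat) (f : Nat → Nat → Int) : Prop :=
  A.length = m ∧ ∀ i, i < m →
    (A.getD i []).length = n ∧ ∀ j, j < n → (A.getD i []).getD j 0 = f i j

theorem isMat_zip {A B : List (List Int)} {m n : Nat} {f g : Nat → Nat → Int}
    (hA : IsMat A m n f) (hB : IsMat B m n g) (h : Int → Int → Int) :
    IsMat (zipWith2 h A B) m n (fun i j => h (f i j) (g i j)) := by
  obtain ⟨hAl, hAe⟩ := hA
  obtain ⟨hBl, hBe⟩ := hB
  unfold zipWith2
  have hiA : ∀ i, i < m → i < A.length := by omega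
  have hiB : ∀ i, i < m → i < B.length := by omega
  refine ⟨by simp [hAl, hBl], ?_⟩
  intro i hi
  have hrow : (List.zipWith (fun ra rb => List.zipWith h ra rb) A B).getD i [] =
      List.zipWith h (A.getD i []) (B.getD i []) := by
    rw [List.getD_eq_getElem _ _ (by simp [hAl, hBl]; omega), List.getElem_zipWith,
      List.getD_eq_getElem _ _ (hiA i hi), List.getD_eq_getElem _ _ (hiB i hi)]
  have hArow := hAe i hi
  have hBrow := hBe i hi
  refine ⟨by rw [hrow, List.length_zipWith, hArow.1, hBrow.1, Nat.min_self], ?_⟩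
  intro j hj
  show _ = h (f i j) (g i j)
  rw [hrow, List.getD_eq_getElem _ _
      (by rw [List.length_zipWith, hArow.1, hBrow.1, Nat.min_self]; exact hj),
    List.getElem_zipWith, ← hArow.2 j hj, ← hBrow.2 j hj]
  exact congrArg₂ h (List.getD_eq_getElem _ _ (by rw [hArow.1]; exact hj)).symm
    (List.getD_eq_getElem _ _ (by rw [hBrow.1]; exact hj)).symm

-- clamped index a row/column shift reads: i-1, i or min (i+1) (m-1)
def pvSh (d : Int) (m i : Nat) : Nat :=
  if d < 0 then i - 1 else if 0 < d then min (i+1) (m-1) else i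

theorem isMat_shiftRows {A : List (List Int)} {m n : Nat} {f : Nat → Nat → Int}
    (hm : 0 < m) (hA : IsMat A m n f) (d : Int) :
    IsMat (shiftRows A d) m n (fun i j => f (pvSh d m i) j) := by
  obtain ⟨hAl, hAe⟩ := hA
  unfold shiftRows pvSh
  split_ifs with h1 h2
  · -- d < 0 : first row duplicated
    refine ⟨by simp [hAl]; omega, ?_⟩
    intro i hi
    match i with
    | 0 => simpa using hAe 0 hm
    | (i+1) =>
      have hrow : (A.getD 0 [] :: A.dropLast).getD (i+1) [] = A.getD i [] := by
        by_cases hilt : i < m - 1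
        · rw [List.getD_cons_succ, List.getD_eq_getElem _ _ (by simp [hAl]; omega),
            List.getElem_dropLast, ← List.getD_eq_getElem _ _ (by omega)]
        · have : ¬ (i + 1 - 1 < (A.dropLast).length) := by simp [hAl]; omega
          have hno : ¬ (i < A.length) := by omega
          rw [List.getD_cons_succ, List.getD_eq_getElem?_getD, List.getD_eq_getElem?_getD]
          rw [List.getElem?_eq_none_iff.mpr (by simp [hAl]; omega),
            List.getElem?_eq_none_iff.mpr (by omega)]
      rw [hrow]
      simpa using hAe i (by omega)
  · -- 0 < d : last row duplicated
    refine ⟨by simp [hAl]; omega, ?_⟩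
    intro i hi
    by_cases hilt : i < m - 1
    · have hrow : (A.drop 1 ++ [A.getD (A.length - 1) []]).getD i [] = A.getD (i+1) [] := by
        rw [List.getD_eq_getElem _ _ (by simp [hAl]; omega),
          List.getElem_append_left (by simp [hAl]; omega), List.getElem_drop,
          ← List.getD_eq_getElem _ _ (by omega), Nat.add_comm 1 i]
      rw [hrow]
      have := hAe (i+1) (by omega)
      simpa [show min (i+1) (m-1) = i + 1 by omega] using this
    · have hieq : i = m - 1 := by omega
      have hrow : (A.drop 1 ++ [A.getD (A.length - 1) []]).getD i [] = A.getD (m-1) [] := by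
        rw [List.getD_eq_getElem _ _ (by simp [hAl]; omega),
          List.getElem_append_right (by simp [hAl]; omega), List.getElem_singleton, hAl]
      rw [hrow]
      have := hAe (m-1) (by omega)
      simpa [show min (i+1) (m-1) = m - 1 by omega] using this
  · exact ⟨hAl, fun i hi => hAe i hi⟩

-- same fact for one row: r[:-1] / r[1:] with the edge element duplicated
theorem rowShift_getD {r : List Int} {n : Nat} {g : Nat → Int}
    (hn : 0 < n) (hr : r.length = n) (hg : ∀ j, j < n → r.getD j 0 = g j) (d : Int) :
    (if d < 0 then r.getD 0 0 :: r.dropLast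
     else if 0 < d then r.drop 1 ++ [r.getD (r.length - 1) 0]
     else r).length = n ∧
    ∀ j, j < n → (if d < 0 then r.getD 0 0 :: r.dropLast
     else if 0 < d then r.drop 1 ++ [r.getD (r.length - 1) 0]
     else r).getD j 0 = g (pvSh d n j) := by
  unfold pvSh
  split_ifs with h1 h2
  · refine ⟨by simp [hr]; omega, ?_⟩
    intro j hj
    match j with
    | 0 => simpa using hg 0 hn
    | (j+1) =>
      have hjlt : j < n - 1 ∨ ¬ (j < n - 1) := em _
      rcases hjlt with hjlt | hjlt
      · rw [List.getD_cons_succ, List.getD_eq_getElem _ _ (by simp [hr]; omega),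
          List.getElem_dropLast, ← List.getD_eq_getElem _ _ (by omega)]
        simpa using hg j (by omega)
      · rw [List.getD_cons_succ, List.getD_eq_getElem?_getD,
          List.getElem?_eq_none_iff.mpr (by simp [hr]; omega)]
        have := hg j (by omega)
        rw [List.getD_eq_getElem?_getD, List.getElem?_eq_none_iff.mpr (by omega)] at this
        simpa using this
  · refine ⟨by simp [hr]; omega, ?_⟩
    intro j hj
    by_cases hjlt : j < n - 1
    · rw [List.getD_eq_getElem _ _ (by simp [hr]; omega),
        List.getElem_append_left (by simp [hr]; omega), List.getElem_drop,
        ← List.getD_eq_getElem _ _ (by omega), Nat.add_comm 1 j]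
      rw [show min (j+1) (n-1) = j + 1 by omega]
      exact hg (j+1) (by omega)
    · rw [List.getD_eq_getElem _ _ (by simp [hr]; omega),
        List.getElem_append_right (by simp [hr]; omega), List.getElem_singleton]
      rw [show min (j+1) (n-1) = n - 1 by omega, hr]
      exact hg (n-1) (by omega)
  · exact ⟨hr, fun j hj => by rw [hg j hj]⟩

theorem isMat_shiftCols {A : List (List Int)} {m n : Nat} {f : Nat → Nat → Int}
    (hn : 0 < n) (hA : IsMat A m n f) (d : Int) :
    IsMat (shiftCols A d) m n (fun i j => f i (pvSh d n j)) := by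
  obtain ⟨hAl, hAe⟩ := hA
  have hrow : ∀ i, i < m → (shiftCols A d).getD i [] =
      (if d < 0 then (A.getD i []).getD 0 0 :: (A.getD i []).dropLast
       else if 0 < d then (A.getD i []).drop 1 ++ [(A.getD i []).getD ((A.getD i []).length - 1) 0]
       else (A.getD i [])) := by
    intro i hi
    unfold shiftCols
    split_ifs with h1 h2
    · rw [List.getD_eq_getElem _ _ (by simp [hAl]; omega), List.getElem_map,
        ← List.getD_eq_getElem _ _ (by omega)]
    · rw [List.getD_eq_getElem _ _ (by simp [hAl]; omega), List.getElem_map,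
        ← List.getD_eq_getElem _ _ (by omega)]
    · rfl
  have hlen : (shiftCols A d).length = m := by
    unfold shiftCols; split_ifs <;> simp [hAl]
  refine ⟨hlen, ?_⟩
  intro i hi
  rw [hrow i hi]
  have h := rowShift_getD (r := A.getD i []) (n := n) (g := f i) hn (hAe i hi).1 (hAe i hi).2 d
  exact ⟨h.1, h.2⟩

-- cropping each row to the first-row length, under Pre_
theorem isMat_crop (lena : List (List Int))
    (hw : ∀ row ∈ lena, (lena.getD 0 []).length ≤ row.length) :
    IsMat (lena.map (fun r => r.take (lena.getD 0 []).length))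
      lena.length (lena.getD 0 []).length
      (fun i j => (lena.getD i []).getD j 0) := by
  set n := (lena.getD 0 []).length
  refine ⟨by simp, ?_⟩
  intro i hi
  have hrow : (lena.map (fun r => r.take n)).getD i [] = (lena.getD i []).take n := by
    rw [List.getD_eq_getElem _ _ (by simpa), List.getElem_map,
      ← List.getD_eq_getElem _ _ hi]
  have hmem : lena.getD i [] ∈ lena := by
    rw [List.getD_eq_getElem _ _ hi]; exact List.getElem_mem _
  have hlen : n ≤ (lena.getD i []).length := hw _ hmem
  refine ⟨by rw [hrow, List.length_take]; omega, ?_⟩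
  intro j hj
  rw [hrow, List.getD_eq_getElem _ _ (by rw [List.length_take]; omega), List.getElem_take,
    ← List.getD_eq_getElem _ _ (by omega)]

-- an IsMat matrix is literally the map-of-map table of its entries
theorem isMat_eq {A : List (List Int)} {m n : Nat} {f : Nat → Nat → Int}
    (hA : IsMat A m n f) :
    A = (List.range m).map (fun i => (List.range n).map (fun j => f i j)) := by
  obtain ⟨hAl, hAe⟩ := hA
  apply List.ext_getElem (by simp [hAl])
  intro i h1 h2
  have hi : i < m := by omega
  have hrlen : A[i].length = n := by
    have := (hAe i hi).1
    rw [List.getD_eq_getElem _ _ h1] at this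
    exact this
  apply List.ext_getElem
  · simp [hrlen]
  · intro j hj1 hj2
    have hjn : j < n := by omega
    have := (hAe i hi).2 j hjn
    rw [List.getD_eq_getElem _ _ h1, List.getD_eq_getElem _ _ hj1] at this
    simpa using this

theorem pvSh_neg (m i : Nat) : pvSh (-1) m i = i - 1 := by simp [pvSh]
theorem pvSh_zero (m i : Nat) : pvSh 0 m i = i := by simp [pvSh]
theorem pvSh_pos (m i : Nat) : pvSh 1 m i = min (i+1) (m-1) := by norm_num [pvSh]

-- 8 * max x y - 3 * t = max (8x - 3t) (8y - 3t): threshold argument distributes over max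
theorem pvMaxLin (x y t : Int) :
    8 * max x y - 3 * t = max (8*x - 3*t) (8*y - 3*t) := by
  rcases le_total x y with h | h
  · rw [max_eq_right h, max_eq_right (by omega)]
  · rw [max_eq_left h, max_eq_left (by omega)]

-- per-pixel arithmetic: A's eight unrolled masks = 8 * (sliding-window max) - 3 * total
set_option maxHeartbeats 4000000 in
theorem pvPix (a b c d e f g h t : Int) :
    (if max (max (max (max (max (max (max (5*(c+d+e) + 3*(-a - b - h - g - f)) (5*(a+h+g) + 3*(-c - b - d - e - f))) (5*(a+b+c) + 3*(-h - g - d - e - f))) (5*(g+f+e) + 3*(-a - h - c - d - b))) (5*(a+h+b) + 3*(-c - d - e - f - g))) (5*(c+d+b) + 3*(-a - h - g - f - e))) (5*(e+d+f) + 3*(-a - b - h - g - c))) (5*(g+h+f) + 3*(-a - b - c - d - e)) < t then (255:Int) else 0)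
  = (if 8 * (max (max (max (max (max (max (max (a + b + c) (a + b + c - a + d)) (a + b + c - a + d - b + e)) (a + b + c - a + d - b + e - c + f)) (a + b + c - a + d - b + e - c + f - d + g)) (a + b + c - a + d - b + e - c + f - d + g - e + h)) (a + b + c - a + d - b + e - c + f - d + g - e + h - f + a)) (a + b + c - a + d - b + e - c + f - d + g - e + h - f + a - g + b)) - 3 * (a + b + c + d + e + f + g + h) < t then (255:Int) else 0) := by
  have maxPerm : ∀ x0 x1 x2 x3 x4 x5 x6 x7 : Int,
      max (max (max (max (max (max (max x2 x6) x0) x4) x7) x1) x3) x5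
        = max (max (max (max (max (max (max x0 x1) x2) x3) x4) x5) x6) x7 := by
    intro x0 x1 x2 x3 x4 x5 x6 x7
    apply le_antisymm <;> simp only [max_le_iff] <;>
      refine ⟨⟨⟨⟨⟨⟨⟨?_, ?_⟩, ?_⟩, ?_⟩, ?_⟩, ?_⟩, ?_⟩, ?_⟩ <;> (simp only [le_max_iff]; omega)
  have key : max (max (max (max (max (max (max (5*(c+d+e) + 3*(-a - b - h - g - f)) (5*(a+h+g) + 3*(-c - b - d - e - f))) (5*(a+b+c) + 3*(-h - g - d - e - f))) (5*(g+f+e) + 3*(-a - h - c - d - b))) (5*(a+h+b) + 3*(-c - d - e - f - g))) (5*(c+d+b) + 3*(-a - h - g - f - e))) (5*(e+d+f) + 3*(-a - b - h - g - c))) (5*(g+h+f) + 3*(-a - b - c - d - e)) = 8 * (max (max (max (max (max (max (max (a + b + c) (a + b + c - a + d)) (a + b + c - a + d - b + e)) (a + b + c - a + d - b + e - c + f)) (a + b + c - a + d - b + e - c + f - d + g)) (a + b + c - a + d - b + e - c + f - d + g - e + h)) (a + b + c - a + d - b + e - c + f - d + g - e + h - f + a)) (a + b + c - a + d - b + e -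 c + f - d + g - e + h - f + a - g + b)) - 3 * (a + b + c + d + e + f + g + h) := by
    rw [show 5*(c+d+e) + 3*(-a - b - h - g - f) = 8 * (a + b + c - a + d - b + e) - 3 * (a + b + c + d + e + f + g + h) by ring,
      show 5*(a+h+g) + 3*(-c - b - d - e - f) = 8 * (a + b + c - a + d - b + e - c + f - d + g - e + h - f + a) - 3 * (a + b + c + d + e + f + g + h) by ring,
      show 5*(a+b+c) + 3*(-h - g - d - e - f) = 8 * (a + b + c) - 3 * (a + b + c + d + e + f + g + h) by ring,
      show 5*(g+f+e) + 3*(-a - h - c - d - b) = 8 * (a + b + c - a + d - b + e - c + f - d + g) - 3 * (a + b + c + d + e + f + g + h) by ring,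
      show 5*(a+h+b) + 3*(-c - d - e - f - g) = 8 * (a + b + c - a + d - b + e - c + f - d + g - e + h - f + a - g + b) - 3 * (a + b + c + d + e + f + g + h) by ring,
      show 5*(c+d+b) + 3*(-a - h - g - f - e) = 8 * (a + b + c - a + d) - 3 * (a + b + c + d + e + f + g + h) by ring,
      show 5*(e+d+f) + 3*(-a - b - h - g - c) = 8 * (a + b + c - a + d - b + e - c + f) - 3 * (a + b + c + d + e + f + g + h) by ring,
      show 5*(g+h+f) + 3*(-a - b - c - d - e) = 8 * (a + b + c - a + d - b + e - c + f - d + g - e + h) - 3 * (a + b + c + d + e + f + g + h) by ring]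
    rw [maxPerm]
    simp only [pvMaxLin]
  rw [key]

-- ===== VERDICT (by name: the statement is the Claim_ definition above) =====
set_option maxHeartbeats 4000000 in
theorem kirsch_spec : Claim_equal_kirsch := by
  intro lena t _ hpre
  obtain ⟨hne, hn, hw⟩ := hpre
  unfold Spec_kirsch
  have hm : 0 < lena.length := List.length_pos_iff.mpr hne
  -- B side: characterise kirsch_alt as a map-of-map table
  have hC := isMat_crop lena hw
  have hSh : ∀ (di dj : Int),
      IsMat (shiftCols (shiftRows (lena.map (fun r => r.take (lena.getD 0 []).length)) di) dj)
        lena.length (lena.getD 0 []).length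
        (fun i j => (lena.getD (pvSh di lena.length i) []).getD (pvSh dj (lena.getD 0 []).length j) 0) :=
    fun di dj => isMat_shiftCols hn (isMat_shiftRows hm hC di) dj
  have hN0 := hSh (-1) (-1)
  have hN1 := hSh (-1) 0
  have hN2 := hSh (-1) 1
  have hN3 := hSh 0 1
  have hN4 := hSh 1 1
  have hN5 := hSh 1 0
  have hN6 := hSh 1 (-1)
  have hN7 := hSh 0 (-1)
  have hT := isMat_zip (isMat_zip (isMat_zip (isMat_zip (isMat_zip (isMat_zip (isMat_zip hN0 hN1
      (fun x y => x + y)) hN2 (fun x y => x + y)) hN3 (fun x y => x + y)) hN4 (fun x y => x + y))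
      hN5 (fun x y => x + y)) hN6 (fun x y => x + y)) hN7 (fun x y => x + y)
  have hW0 := isMat_zip (isMat_zip hN0 hN1 (fun x y => x + y)) hN2 (fun x y => x + y)
  have hW1 := isMat_zip (isMat_zip hW0 hN0 (fun x y => x - y)) hN3 (fun x y => x + y)
  have hW2 := isMat_zip (isMat_zip hW1 hN1 (fun x y => x - y)) hN4 (fun x y => x + y)
  have hW3 := isMat_zip (isMat_zip hW2 hN2 (fun x y => x - y)) hN5 (fun x y => x + y)
  have hW4 := isMat_zip (isMat_zip hW3 hN3 (fun x y => x - y)) hN6 (fun x y => x + y)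
  have hW5 := isMat_zip (isMat_zip hW4 hN4 (fun x y => x - y)) hN7 (fun x y => x + y)
  have hW6 := isMat_zip (isMat_zip hW5 hN5 (fun x y => x - y)) hN0 (fun x y => x + y)
  have hW7 := isMat_zip (isMat_zip hW6 hN6 (fun x y => x - y)) hN1 (fun x y => x + y)
  have hBest := isMat_zip (isMat_zip (isMat_zip (isMat_zip (isMat_zip (isMat_zip (isMat_zip hW0 hW1
      max) hW2 max) hW3 max) hW4 max) hW5 max) hW6 max) hW7 max
  have hB : IsMat (kirsch_alt lena t) lena.length (lena.getD 0 []).length _ :=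
    isMat_zip hBest hT (fun wv tv => if 8*wv - 3*tv < t then 255 else 0)
  rw [isMat_eq hB]
  simp only [kirsch]
  refine List.map_congr_left ?_
  intro i hi
  rw [List.mem_range] at hi
  dsimp only
  refine List.map_congr_left ?_
  intro j hj
  rw [List.mem_range] at hj
  dsimp only
  rw [rd_expan lena hm hn i j (by omega) (by omega),
    rd_expan lena hm hn i (j+1) (by omega) (by omega),
    rd_expan lena hm hn i (j+2) (by omega) (by omega),
    rd_expan lena hm hn (i+1) j (by omega) (by omega),
    rd_expan lena hm hn (i+1) (j+2) (by omega) (by omega),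
    rd_expan lena hm hn (i+2) j (by omega) (by omega),
    rd_expan lena hm hn (i+2) (j+1) (by omega) (by omega),
    rd_expan lena hm hn (i+2) (j+2) (by omega) (by omega)]
  rw [show i + 1 - 1 = i by omega, show i + 2 - 1 = i + 1 by omega,
    show j + 1 - 1 = j by omega, show j + 2 - 1 = j + 1 by omega,
    show min (i-1) (lena.length-1) = i - 1 by omega,
    show min i (lena.length-1) = i by omega,
    show min (j-1) ((lena.getD 0 []).length-1) = j - 1 by omega,
    show min j ((lena.getD 0 []).length-1) = j by omega]
  simp only [pvSh_neg, pvSh_zero, pvSh_pos]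
  exact pvPix _ _ _ _ _ _ _ _ t
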